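-- pv_equiv track=rewrite | github.com/kimbap918/TIL | 알고리즘/백준/Bronze/#24313 알고리즘 수업 - 점근적 표기 1/알고리즘 수업 － 점근적 표기 1.py | fn
-- ===== SOURCE A (Python) =====
-- def fn(a1, a0, c, n0):
--     ans = 1
--     for n in range(n0, 101):
--         f = (a1*n) + a0
--         cg = c*n
--
--         if f > cg:
--             ans = 0
--             break
--
--     return ans
-- ===== SOURCE B (Python) =====
-- def fn(a1, a0, c, n0):
--     # f(n)-c*g(n) = (a1-c)*n + a0 is linear in n, so on [n0,100] its maximum
--     # is at an endpoint: just test n0 and 100 instead of scanning.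
--     if n0 > 100:
--         return 1
--     if a1*n0 + a0 > c*n0 or a1*100 + a0 > c*100:
--         return 0
--     return 1
-- ===== Notes on version B (the rewrite author's own statement) =====
-- stated objective: faster
-- what changed: Replaces the scan over range(n0,101) by a closed-form endpoint test: the difference (a1-c)*n+a0 is linear in n, so checking n0 and 100 suffices.
import Mathlib
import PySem

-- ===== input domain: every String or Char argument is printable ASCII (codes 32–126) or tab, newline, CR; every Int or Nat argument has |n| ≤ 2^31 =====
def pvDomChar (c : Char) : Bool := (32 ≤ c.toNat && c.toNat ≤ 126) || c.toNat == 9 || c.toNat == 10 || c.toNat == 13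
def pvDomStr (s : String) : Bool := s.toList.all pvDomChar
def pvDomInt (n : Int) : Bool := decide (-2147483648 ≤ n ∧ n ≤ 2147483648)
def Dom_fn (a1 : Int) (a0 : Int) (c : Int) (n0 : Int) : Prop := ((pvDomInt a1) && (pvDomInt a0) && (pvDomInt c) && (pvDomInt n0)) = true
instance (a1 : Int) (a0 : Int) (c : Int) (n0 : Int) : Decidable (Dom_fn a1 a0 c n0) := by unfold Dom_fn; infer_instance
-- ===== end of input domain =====

-- B replaces A's scan over range(n0, 101) by an O(1) endpoint test, justified
-- by linearity of (a1-c)*n + a0 in n.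

-- ===== PORT A =====
-- the for-loop with break: returns 0 at the first n with f > cg, else 1
def fnLoop (a1 : Int) (a0 : Int) (c : Int) : List Int → Int
  | [] => 1
  | n :: rest =>
      let f := a1 * n + a0
      let cg := c * n
      if f > cg then 0 else fnLoop a1 a0 c rest

def fn (a1 : Int) (a0 : Int) (c : Int) (n0 : Int) : Int :=
  fnLoop a1 a0 c (PySem.List.pyRange n0 101 1)

-- ===== PORT B =====
def fn_alt (a1 : Int) (a0 : Int) (c : Int) (n0 : Int) : Int :=
  if n0 > 100 then 1
  else if a1 * n0 + a0 > c * n0 ∨ a1 * 100 + a0 > c * 100 then 0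
  else 1

-- ===== PRECONDITION & SPEC =====
def Spec_fn (a1 : Int) (a0 : Int) (c : Int) (n0 : Int) (out : Int) : Prop := out = fn_alt a1 a0 c n0
instance (a1 : Int) (a0 : Int) (c : Int) (n0 : Int) (out : Int) : Decidable (Spec_fn a1 a0 c n0 out) := by unfold Spec_fn; infer_instance

-- ===== CLAIM (what is proved, stated in full; the proofs are below) =====
def Claim_equal_fn : Prop := ∀ (a1 : Int) (a0 : Int) (c : Int) (n0 : Int), Dom_fn a1 a0 c n0 → Spec_fn a1 a0 c n0 (fn a1 a0 c n0)

-- ===== LEMMAS AND PROOFS =====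

-- the loop returns 1 when no element violates the bound
theorem fnLoop_eq_one {a1 a0 c : Int} {l : List Int}
    (h : ∀ n ∈ l, a1 * n + a0 ≤ c * n) : fnLoop a1 a0 c l = 1 := by
  induction l with
  | nil => rfl
  | cons n rest ih =>
      have hn := h n (by simp)
      simp only [fnLoop]
      rw [if_neg (by omega)]
      exact ih fun m hm => h m (List.mem_cons_of_mem _ hm)

-- the loop returns 0 when some element violates the bound
theorem fnLoop_eq_zero {a1 a0 c : Int} {l : List Int}
    (h : ∃ n ∈ l, a1 * n + a0 > c * n) : fnLoop a1 a0 c l = 0 := by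
  induction l with
  | nil => simp at h
  | cons n rest ih =>
      simp only [fnLoop]
      by_cases hn : a1 * n + a0 > c * n
      · rw [if_pos (by omega)]
      · rw [if_neg (by omega)]
        rcases h with ⟨m, hm, hmv⟩
        rcases List.mem_cons.mp hm with rfl | hm'
        · omega
        · exact ih ⟨m, hm', hmv⟩

-- linearity: if the bound holds at both endpoints, it holds in between
theorem linear_between {a1 a0 c n0 n : Int} (h1 : n0 ≤ n) (h2 : n ≤ 100)
    (e1 : a1 * n0 + a0 ≤ c * n0) (e2 : a1 * 100 + a0 ≤ c * 100) :
    a1 * n + a0 ≤ c * n := by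
  by_cases h : a1 ≤ c
  · nlinarith [mul_nonneg (sub_nonneg.mpr h) (sub_nonneg.mpr h1)]
  · push_neg at h
    nlinarith [mul_nonneg (sub_nonneg.mpr h.le) (sub_nonneg.mpr h2)]

-- ===== VERDICT (by name: the statement is the Claim_ definition above) =====
theorem fn_spec : Claim_equal_fn := by
  intro a1 a0 c n0 _
  show fn a1 a0 c n0 = fn_alt a1 a0 c n0
  unfold fn fn_alt
  by_cases hbig : n0 > 100
  · rw [PySem.List.pyRange_one_eq_nil (by omega), if_pos hbig]
    rfl
  · rw [if_neg hbig]
    by_cases hviol : a1 * n0 + a0 > c * n0 ∨ a1 * 100 + a0 > c * 100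
    · rw [if_pos hviol]
      apply fnLoop_eq_zero
      rcases hviol with h | h
      · exact ⟨n0, PySem.List.mem_pyRange_one.mpr ⟨le_refl _, by omega⟩, h⟩
      · exact ⟨100, PySem.List.mem_pyRange_one.mpr ⟨by omega, by omega⟩, h⟩
    · rw [if_neg hviol]
      push_neg at hviol
      apply fnLoop_eq_one
      intro n hn
      rcases PySem.List.mem_pyRange_one.mp hn with ⟨hl, hr⟩
      exact linear_between hl (by omega) hviol.1 hviol.2
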